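-- pv_equiv track=rewrite | github.com/janbartnitsky/robocarrier | communicator.py | shift_after_path
-- ===== SOURCE A (Python) =====
-- def shift_after_path(robot_path):
-- 	position_shift = [0, 0]
-- 	for i in range(len(robot_path)):
-- 		if robot_path[i] == "D":
-- 			position_shift[0] -= 1
-- 		elif robot_path[i] == "U":
-- 			position_shift[0] += 1
-- 		elif robot_path[i] == "R":
-- 			position_shift[1] -= 1
-- 		elif robot_path[i] == "L":
-- 			position_shift[1] += 1
-- 	return position_shift
-- ===== SOURCE B (Python) =====
-- def shift_after_path(robot_path):
--     return [robot_path.count("U") - robot_path.count("D"),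
--             robot_path.count("L") - robot_path.count("R")]
-- ===== Notes on version B (the rewrite author's own statement) =====
-- stated objective: simpler
-- what changed: Replaces the single-pass branch-and-accumulate loop over characters with four independent str.count scans (one per move letter) combined arithmetically in the return expression, eliminating the running state entirely.
import Mathlib
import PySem

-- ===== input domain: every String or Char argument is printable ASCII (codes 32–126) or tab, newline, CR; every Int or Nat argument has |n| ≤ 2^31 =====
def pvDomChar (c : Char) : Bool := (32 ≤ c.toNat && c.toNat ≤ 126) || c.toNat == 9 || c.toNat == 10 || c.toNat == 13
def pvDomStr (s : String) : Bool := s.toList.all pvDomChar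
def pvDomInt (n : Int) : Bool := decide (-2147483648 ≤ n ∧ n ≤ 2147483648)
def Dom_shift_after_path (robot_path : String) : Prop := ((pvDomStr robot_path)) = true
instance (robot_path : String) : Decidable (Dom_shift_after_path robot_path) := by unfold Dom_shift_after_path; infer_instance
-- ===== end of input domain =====

-- B replaces A's single-pass branch-and-accumulate loop with four independent per-letter count scans combined in the return expression (objective: simpler).


-- ===== PORT A =====
-- A: running displacement pair, one branch per character, in A's branch order.
def shift_after_path (robot_path : String) : List Int :=
  let p := robot_path.toList.foldl (fun (ps : Int × Int) c =>
    if c == 'D' then (ps.1 - 1, ps.2)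
    else if c == 'U' then (ps.1 + 1, ps.2)
    else if c == 'R' then (ps.1, ps.2 - 1)
    else if c == 'L' then (ps.1, ps.2 + 1)
    else ps) (0, 0)
  [p.1, p.2]

-- ===== PORT B =====
-- B: four independent str.count scans (single-char needle → List.count), combined in the return.
def shift_after_path_alt (robot_path : String) : List Int :=
  [(robot_path.toList.count 'U' : Int) - robot_path.toList.count 'D',
   (robot_path.toList.count 'L' : Int) - robot_path.toList.count 'R']

-- ===== PRECONDITION & SPEC =====
def Spec_shift_after_path (robot_path : String) (out : List Int) : Prop := out = shift_after_path_alt robot_path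
instance (robot_path : String) (out : List Int) : Decidable (Spec_shift_after_path robot_path out) := by unfold Spec_shift_after_path; infer_instance

-- ===== CLAIM (what is proved, stated in full; the proofs are below) =====
def Claim_equal_shift_after_path : Prop := ∀ (robot_path : String), Dom_shift_after_path robot_path → Spec_shift_after_path robot_path (shift_after_path robot_path)

-- ===== LEMMAS AND PROOFS =====
theorem shift_foldl_eq_counts (l : List Char) (a b : Int) :
    l.foldl (fun (ps : Int × Int) c =>
      if c == 'D' then (ps.1 - 1, ps.2)
      else if c == 'U' then (ps.1 + 1, ps.2)
      else if c == 'R' then (ps.1, ps.2 - 1)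
      else if c == 'L' then (ps.1, ps.2 + 1)
      else ps) (a, b)
    = (a + l.count 'U' - l.count 'D', b + l.count 'L' - l.count 'R') := by
  induction l generalizing a b with
  | nil => simp
  | cons c t ih =>
    simp only [List.foldl_cons, List.count_cons]
    by_cases hD : c = 'D' <;> by_cases hU : c = 'U' <;> by_cases hR : c = 'R' <;>
      by_cases hL : c = 'L' <;> simp_all <;> omega

-- ===== VERDICT (by name: the statement is the Claim_ definition above) =====
theorem shift_after_path_spec : Claim_equal_shift_after_path := by
  intro robot_path _
  unfold Spec_shift_after_path shift_after_path shift_after_path_alt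
  simp only [shift_foldl_eq_counts]
  norm_num
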